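-- pv_equiv track=rewrite | github.com/EAFIT-AACS/assigment2-juan-esteban-trujillo-juan-jose-diaz | ALGORITHM_2_LFCO_2025_JET_JJD.py | PDA
-- ===== SOURCE A (Python) =====
-- def PDA(strings):
--
--     # Lists to store the accepted and rejected strings
--     acceptedStrings = []
--     rejectedStrings = []
--
--     # Loop to verify each string
--     for string in strings:
--
--         # Initial state and stack
--         stack = ["$"]
--         state = "q0"
--
--         # If the string is empty, the initial state is q1 and the empty string is accepted
--         if string == "":
--             state = "q1"
--
--         # Loop to verify each character of the string
--         for char in string:
--             state,stack = transitions(state,stack,char)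
--             if state == "Rule Not Define":
--                 break
--
--         # If the state is q1 and the stack has only the initial symbol, the string is accepted
--         if state == "q1" and len(stack) == 1 and stack[0] == "$":
--             acceptedStrings.append(string)
--
--         # If the state is different from q1 or the stack is different from the initial symbol, the string is rejected
--         else:
--             rejectedStrings.append(string)
--
--     # Return the list of accepted and rejected strings
--     return acceptedStrings,rejectedStrings
--
-- def transitions(state,stack,char):
--
--     # Transitions of the PDA
--     if state == "q0":
--
--         # If the character is "a" and the top of the stack is "$" or "A", the stack receives "A" and the state is q0
--         if char == "a" and (stack[-1] == "$" or stack[-1] == "a"):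
--             stack.append("a")
--             state = "q0"
--             return state,stack
--
--         # If the character is "b" and the top of the stack is "A", the stack pops the top and the state is q1
--         elif char == "b" and stack[-1] == "a":
--             stack.pop()
--             state = "q1"
--             return state,stack
--
--     # If the state is q1
--     elif state == "q1":
--
--         # If the character is "b" and the top of the stack is "A", the stack pops the top and the state is q1
--         if char == "b" and stack[-1] == "a":
--             stack.pop()
--             state = "q1"
--             return state,stack
--
--     # If the transitions are not defined, the state is "Rule Not Define"
--     return "Rule Not Define", stack
-- ===== SOURCE B (Python) =====
-- def PDA(strings):
--     acceptedStrings = []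
--     rejectedStrings = []
--     for string in strings:
--         L = len(string)
--         if L % 2 == 0 and string == "a" * (L // 2) + "b" * (L // 2):
--             acceptedStrings.append(string)
--         else:
--             rejectedStrings.append(string)
--     return acceptedStrings, rejectedStrings
-- ===== Notes on version B (the rewrite author's own statement) =====
-- stated objective: simpler
-- what changed: Replaced the step-by-step PDA simulation (explicit stack, transition function, per-character loop) with a closed-form recognition: accept s iff len(s) is even and s equals 'a'*(len//2)+'b'*(len//2).
import Mathlib
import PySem

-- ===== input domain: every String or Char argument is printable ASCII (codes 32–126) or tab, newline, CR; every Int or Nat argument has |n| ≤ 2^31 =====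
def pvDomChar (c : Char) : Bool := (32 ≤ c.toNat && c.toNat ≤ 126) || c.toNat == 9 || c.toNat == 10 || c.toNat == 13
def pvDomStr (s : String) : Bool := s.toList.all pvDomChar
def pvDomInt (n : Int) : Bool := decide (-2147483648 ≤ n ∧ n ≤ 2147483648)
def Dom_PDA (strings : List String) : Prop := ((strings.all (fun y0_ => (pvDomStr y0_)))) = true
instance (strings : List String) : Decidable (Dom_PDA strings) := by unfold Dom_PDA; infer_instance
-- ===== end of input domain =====

-- B drops the stack-machine simulation and recognizes aⁿbⁿ in closed form (simpler).

-- ===== PORT A =====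
-- transitions(state, stack, char); stack[-1] is PySem.List.pyGet? stack (-1),
-- stack.append("a") is stack ++ ["a"], stack.pop() (last element) is stack.dropLast.
def pdaTransitions (state : String) (stack : List String) (char : Char) : String × List String :=
  if state = "q0" then
    if char = 'a' ∧ (PySem.List.pyGet? stack (-1) = some "$" ∨ PySem.List.pyGet? stack (-1) = some "a") then
      ("q0", stack ++ ["a"])
    else if char = 'b' ∧ PySem.List.pyGet? stack (-1) = some "a" then
      ("q1", stack.dropLast)
    else
      ("Rule Not Define", stack)
  else if state = "q1" then
    if char = 'b' ∧ PySem.List.pyGet? stack (-1) = some "a" then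
      ("q1", stack.dropLast)
    else
      ("Rule Not Define", stack)
  else
    ("Rule Not Define", stack)


-- the 'for char in string' loop with its 'break' on "Rule Not Define"
def pdaLoop (state : String) (stack : List String) : List Char → String × List String
  | [] => (state, stack)
  | c :: cs =>
    let p := pdaTransitions state stack c
    if p.1 = "Rule Not Define" then p else pdaLoop p.1 p.2 cs

def PDA (strings : List String) : List String × List String :=
  strings.foldl
    (fun (acc : List String × List String) string =>
      if (pdaLoop (if string = "" then "q1" else "q0") ["$"] string.toList).1 = "q1" ∧
         (pdaLoop (if string = "" then "q1" else "q0") ["$"] string.toList).2.length = 1 ∧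
         PySem.List.pyGet? (pdaLoop (if string = "" then "q1" else "q0") ["$"] string.toList).2 0 = some "$" then
        (acc.1 ++ [string], acc.2)
      else
        (acc.1, acc.2 ++ [string]))
    ([], [])

-- ===== PORT B =====
def PDA_alt (strings : List String) : List String × List String :=
  strings.foldl
    (fun (acc : List String × List String) string =>
      if string.length % 2 = 0 ∧
         string = String.ofList (List.replicate (string.length / 2) 'a' ++
                                 List.replicate (string.length / 2) 'b') then
        (acc.1 ++ [string], acc.2)
      else
        (acc.1, acc.2 ++ [string]))
    ([], [])

-- ===== PRECONDITION & SPEC =====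
def Spec_PDA (strings : List String) (out : List String × List String) : Prop := out = PDA_alt strings
instance (strings : List String) (out : List String × List String) : Decidable (Spec_PDA strings out) := by unfold Spec_PDA; infer_instance

-- ===== CLAIM (what is proved, stated in full; the proofs are below) =====
def Claim_equal_PDA : Prop := ∀ (strings : List String), Dom_PDA strings → Spec_PDA strings (PDA strings)

-- ===== LEMMAS AND PROOFS =====

lemma stack_last (i : Nat) :
    PySem.List.pyGet? ("$" :: List.replicate i "a") (-1) =
      some (if i = 0 then "$" else "a") := by
  cases i with
  | zero => decide
  | succ j =>
    rw [List.replicate_succ' (n := j),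
        show ("$" :: (List.replicate j "a" ++ ["a"])) = ("$" :: List.replicate j "a") ++ ["a"] from rfl,
        PySem.List.pyGet?_neg_one_append_singleton]
    simp

lemma dropLast_stack (j : Nat) :
    ("$" :: List.replicate (j + 1) "a").dropLast = "$" :: List.replicate j "a" := by
  rw [List.replicate_succ' (n := j)]
  have h : ("$" :: (List.replicate j "a" ++ ["a"])) = ("$" :: List.replicate j "a") ++ ["a"] := by simp
  rw [h, List.dropLast_concat]

lemma trans_eval (st : String) (i : Nat) (c : Char) :
    pdaTransitions st ("$" :: List.replicate i "a") c =
      if st = "q0" ∧ c = 'a' then ("q0", "$" :: List.replicate (i + 1) "a")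
      else if (st = "q0" ∨ st = "q1") ∧ c = 'b' ∧ 1 ≤ i then ("q1", "$" :: List.replicate (i - 1) "a")
      else ("Rule Not Define", "$" :: List.replicate i "a") := by
  unfold pdaTransitions
  rw [stack_last i]
  cases i with
  | zero => split_ifs <;> simp_all <;> simp_all [List.replicate_succ']
  | succ j => split_ifs <;> simp_all [dropLast_stack] <;> simp_all [List.replicate_succ' (n := j + 1), ← List.cons_append]

-- acceptance test of port A on a final (state, stack) pair
def pdaAcc (r : String × List String) : Prop :=
  r.1 = "q1" ∧ r.2.length = 1 ∧ PySem.List.pyGet? r.2 0 = some "$"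

lemma acc_stack (st : String) (i : Nat) :
    pdaAcc (st, "$" :: List.replicate i "a") ↔ (st = "q1" ∧ i = 0) := by
  cases i with
  | zero => simp [pdaAcc, PySem.List.pyGet?_zero_cons]
  | succ j => simp [pdaAcc]

def leadA : List Char → Nat
  | [] => 0
  | c :: cs => if c = 'a' then leadA cs + 1 else 0

lemma leadA_rep (m k : Nat) (hk : 1 ≤ k) :
    leadA (List.replicate m 'a' ++ List.replicate k 'b') = m := by
  induction m with
  | zero =>
    obtain ⟨k', rfl⟩ : ∃ k', k = k' + 1 := ⟨k - 1, by omega⟩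
    simp [leadA, List.replicate_succ]
  | succ n ihn => simp [List.replicate_succ, leadA, ihn]

lemma loop_step {st : String} {sk : List String} {c : Char} {st' : String} {sk' : List String}
    (cs : List Char) (h : pdaTransitions st sk c = (st', sk')) (h2 : ¬ st' = "Rule Not Define") :
    pdaLoop st sk (c :: cs) = pdaLoop st' sk' cs := by
  simp [pdaLoop, h, h2]

lemma loop_stuck {st : String} {sk : List String} {c : Char} {sk' : List String}
    (cs : List Char) (h : pdaTransitions st sk c = ("Rule Not Define", sk')) :
    pdaLoop st sk (c :: cs) = ("Rule Not Define", sk') := by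
  simp [pdaLoop, h]

lemma trans_a (i : Nat) :
    pdaTransitions "q0" ("$" :: List.replicate i "a") 'a' = ("q0", "$" :: List.replicate (i + 1) "a") := by
  rw [trans_eval]; simp

lemma trans_q0_b (j : Nat) :
    pdaTransitions "q0" ("$" :: List.replicate (j + 1) "a") 'b' = ("q1", "$" :: List.replicate j "a") := by
  rw [trans_eval]; simp

lemma trans_q1_b (j : Nat) :
    pdaTransitions "q1" ("$" :: List.replicate (j + 1) "a") 'b' = ("q1", "$" :: List.replicate j "a") := by
  rw [trans_eval]; simp

lemma trans_q0_stuck (i : Nat) (c : Char) (h1 : ¬ c = 'a') (h2 : ¬ (c = 'b' ∧ 1 ≤ i)) :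
    pdaTransitions "q0" ("$" :: List.replicate i "a") c =
      ("Rule Not Define", "$" :: List.replicate i "a") := by
  rw [trans_eval,
      if_neg (show ¬(("q0":String) = "q0" ∧ c = 'a') from fun h => h1 h.2),
      if_neg (show ¬((("q0":String) = "q0" ∨ ("q0":String) = "q1") ∧ c = 'b' ∧ 1 ≤ i) from
        fun h => h2 h.2)]

lemma trans_q1_stuck (i : Nat) (c : Char) (h2 : ¬ (c = 'b' ∧ 1 ≤ i)) :
    pdaTransitions "q1" ("$" :: List.replicate i "a") c =
      ("Rule Not Define", "$" :: List.replicate i "a") := by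
  rw [trans_eval,
      if_neg (show ¬(("q1":String) = "q0" ∧ c = 'a') from fun h => absurd h.1 (by decide)),
      if_neg (show ¬((("q1":String) = "q0" ∨ ("q1":String) = "q1") ∧ c = 'b' ∧ 1 ≤ i) from
        fun h => h2 h.2)]

lemma acc_rnd (sk : List String) : ¬ pdaAcc ("Rule Not Define", sk) := by
  simp [pdaAcc]

lemma q1_run (cs : List Char) : ∀ i : Nat,
    (pdaAcc (pdaLoop "q1" ("$" :: List.replicate i "a") cs) ↔ cs = List.replicate i 'b') := by
  induction cs with
  | nil =>
    intro i
    rw [show pdaLoop "q1" ("$" :: List.replicate i "a") [] = ("q1", "$" :: List.replicate i "a") from rfl,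
       acc_stack]
    constructor
    · rintro ⟨-, rfl⟩; rfl
    · intro h
      refine ⟨rfl, ?_⟩
      have := congrArg List.length h
      simpa using this.symm
  | cons c cs ih =>
    intro i
    by_cases hcb : c = 'b' ∧ 1 ≤ i
    · obtain ⟨rfl, hi⟩ := hcb
      obtain ⟨j, rfl⟩ : ∃ j, i = j + 1 := ⟨i - 1, by omega⟩
      rw [loop_step cs (trans_q1_b j) (by decide), ih j, List.replicate_succ]
      simp
    · rw [loop_stuck cs (trans_q1_stuck i c hcb)]
      constructor
      · intro h; exact absurd h (acc_rnd _)
      · intro h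
        cases i with
        | zero => simp at h
        | succ j =>
          rw [List.replicate_succ] at h
          exact absurd ⟨(List.cons_eq_cons.mp h).1, by omega⟩ hcb

lemma q0_run (cs : List Char) : ∀ i : Nat,
    (pdaAcc (pdaLoop "q0" ("$" :: List.replicate i "a") cs) ↔
      (1 ≤ i + leadA cs ∧
        cs = List.replicate (leadA cs) 'a' ++ List.replicate (i + leadA cs) 'b')) := by
  induction cs with
  | nil =>
    intro i
    rw [show pdaLoop "q0" ("$" :: List.replicate i "a") [] = ("q0", "$" :: List.replicate i "a") from rfl,
       acc_stack]
    constructor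
    · rintro ⟨h, -⟩; exact absurd h (by decide)
    · rintro ⟨h1, h2⟩
      rw [show leadA [] = 0 from rfl] at h1 h2
      simp at h2
      omega
  | cons c cs ih =>
    intro i
    by_cases hca : c = 'a'
    · subst hca
      rw [loop_step cs (trans_a i) (by decide), ih (i + 1)]
      rw [show leadA ('a' :: cs) = leadA cs + 1 from by simp [leadA]]
      constructor
      · rintro ⟨h1, h2⟩
        refine ⟨by omega, ?_⟩
        rw [List.replicate_succ, List.cons_append,
            show i + (leadA cs + 1) = i + 1 + leadA cs from by omega, ← h2]
      · rintro ⟨h1, h2⟩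
        rw [List.replicate_succ, List.cons_append] at h2
        refine ⟨by omega, ?_⟩
        rw [show i + 1 + leadA cs = i + (leadA cs + 1) from by omega]
        exact (List.cons_eq_cons.mp h2).2
    · by_cases hcb : c = 'b' ∧ 1 ≤ i
      · obtain ⟨rfl, hi⟩ := hcb
        obtain ⟨j, rfl⟩ : ∃ j, i = j + 1 := ⟨i - 1, by omega⟩
        rw [loop_step cs (trans_q0_b j) (by decide), q1_run cs j]
        rw [show leadA ('b' :: cs) = 0 from by simp [leadA]]
        simp [List.replicate_succ]
      · rw [loop_stuck cs (trans_q0_stuck i c hca hcb)]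
        rw [show leadA (c :: cs) = 0 from by simp [leadA, hca]]
        constructor
        · intro h; exact absurd h (acc_rnd _)
        · rintro ⟨h1, h2⟩
          simp only [List.replicate_zero, List.nil_append] at h2
          cases i with
          | zero => omega
          | succ j =>
            rw [show j + 1 + 0 = j + 1 from by omega, List.replicate_succ] at h2
            exact absurd ⟨(List.cons_eq_cons.mp h2).1, by omega⟩ hcb

lemma accept_char (cs : List Char) :
    (pdaAcc (pdaLoop (if cs = [] then "q1" else "q0") ["$"] cs) ↔
      (cs.length % 2 = 0 ∧
        cs = List.replicate (cs.length / 2) 'a' ++ List.replicate (cs.length / 2) 'b')) := by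
  cases cs with
  | nil => simp [pdaLoop, pdaAcc]
  | cons c cs =>
    rw [if_neg (by simp)]
    refine Iff.trans (q0_run (c :: cs) 0) ?_
    simp only [Nat.zero_add]
    constructor
    · rintro ⟨h1, h2⟩
      have hlen : (c :: cs).length = leadA (c :: cs) + leadA (c :: cs) := by
        conv_lhs => rw [h2]
        simp
      have hdiv : (c :: cs).length / 2 = leadA (c :: cs) := by omega
      exact ⟨by omega, by rw [hdiv]; exact h2⟩
    · rintro ⟨h1, h2⟩
      have hpos : 1 ≤ (c :: cs).length / 2 := by
        have : (c :: cs).length ≠ 0 := by simp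
        omega
      have hl : leadA (c :: cs) = (c :: cs).length / 2 := by
        conv_lhs => rw [h2]
        exact leadA_rep _ _ hpos
      rw [hl]
      exact ⟨by omega, h2⟩

lemma accept_str (s : String) :
    (((pdaLoop (if s = "" then "q1" else "q0") ["$"] s.toList).1 = "q1" ∧
      (pdaLoop (if s = "" then "q1" else "q0") ["$"] s.toList).2.length = 1 ∧
      PySem.List.pyGet? (pdaLoop (if s = "" then "q1" else "q0") ["$"] s.toList).2 0 = some "$") ↔
      (s.length % 2 = 0 ∧
        s = String.ofList (List.replicate (s.length / 2) 'a' ++ List.replicate (s.length / 2) 'b'))) := by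
  have hnil : (s = "") = (s.toList = []) := by
    apply propext
    constructor
    · intro h; simp [h]
    · intro h; exact String.toList_injective (by simp [h])
  have hmk : ∀ l : List Char, (s = String.ofList l) ↔ s.toList = l := by
    intro l
    constructor
    · intro h; simp [h]
    · intro h; exact String.toList_injective (by simp [h])
  by_cases hs : s.toList = []
  · rw [if_pos (by rw [hnil]; exact hs)]
    rw [hmk, ← String.length_toList]
    refine Iff.trans ?_ (accept_char s.toList)
    rw [if_pos hs]
    exact Iff.rfl
  · rw [if_neg (by rw [hnil]; exact hs)]
    rw [hmk, ← String.length_toList]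
    refine Iff.trans ?_ (accept_char s.toList)
    rw [if_neg hs]
    exact Iff.rfl

lemma fold_eq (l : List String) : ∀ acc : List String × List String,
    l.foldl
      (fun (acc : List String × List String) string =>
        if (pdaLoop (if string = "" then "q1" else "q0") ["$"] string.toList).1 = "q1" ∧
           (pdaLoop (if string = "" then "q1" else "q0") ["$"] string.toList).2.length = 1 ∧
           PySem.List.pyGet? (pdaLoop (if string = "" then "q1" else "q0") ["$"] string.toList).2 0 = some "$" then
          (acc.1 ++ [string], acc.2)
        else
          (acc.1, acc.2 ++ [string])) acc =
    l.foldl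
      (fun (acc : List String × List String) string =>
        if string.length % 2 = 0 ∧
           string = String.ofList (List.replicate (string.length / 2) 'a' ++
                                   List.replicate (string.length / 2) 'b') then
          (acc.1 ++ [string], acc.2)
        else
          (acc.1, acc.2 ++ [string])) acc := by
  induction l with
  | nil => intro acc; rfl
  | cons s l ih =>
    intro acc
    simp only [List.foldl_cons]
    rw [if_congr (accept_str s) rfl rfl]
    exact ih _

-- ===== VERDICT (by name: the statement is the Claim_ definition above) =====
theorem PDA_spec : Claim_equal_PDA := by
  intro strings _
  unfold Spec_PDA PDA PDA_alt
  exact fold_eq strings ([], [])
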